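-- pv_equiv track=rewrite | github.com/jeonyujin4209/crypto_ctf | cryptohack/CTF Archive/2021/1n_jection (Zh3r0 CTF V2)/solve.py | inv_nk2n
-- ===== SOURCE A (Python) =====
-- from math import isqrt
--
-- def inv_cantor(n):
--     # Find w such that w*(w+1)//2 <= n < (w+1)*(w+2)//2
--     w = (isqrt(8 * n + 1) - 1) // 2
--     t = w * (w + 1) // 2
--     j = n - t
--     i = w - j
--     return i, j
--
-- def inv_nk2n(n, l):
--     if l == 1:
--         return [n]
--     if l == 2:
--         i, j = inv_cantor(n)
--         return [i, j]
--     first_l  = l - l // 2   # ceil(l/2)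
--     second_l = l // 2        # floor(l/2)
--     first_val, second_val = inv_cantor(n)
--     return inv_nk2n(first_val, first_l) + inv_nk2n(second_val, second_l)
-- ===== SOURCE B (Python) =====
-- from math import isqrt
--
-- def inv_cantor(n):
--     w = (isqrt(8 * n + 1) - 1) // 2
--     t = w * (w + 1) // 2
--     j = n - t
--     i = w - j
--     return i, j
--
-- def inv_nk2n(n, l):
--     # Iterative explicit-stack traversal emitting leaves left-to-right.
--     out = []
--     stack = [(n, l)]
--     while stack:
--         v, c = stack.pop()
--         if c == 1:
--             out.append(v)
--         else:
--             i, j = inv_cantor(v)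
--             stack.append((j, c // 2))
--             stack.append((i, c - c // 2))
--     return out
-- ===== Notes on version B (the rewrite author's own statement) =====
-- stated objective: alternative
-- what changed: Replaces the binary recursion (with its redundant l==2 special case and repeated list concatenations) by an explicit iterative stack of (value,count) frames that pops frames and appends leaves left-to-right into one output list.
import Mathlib
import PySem

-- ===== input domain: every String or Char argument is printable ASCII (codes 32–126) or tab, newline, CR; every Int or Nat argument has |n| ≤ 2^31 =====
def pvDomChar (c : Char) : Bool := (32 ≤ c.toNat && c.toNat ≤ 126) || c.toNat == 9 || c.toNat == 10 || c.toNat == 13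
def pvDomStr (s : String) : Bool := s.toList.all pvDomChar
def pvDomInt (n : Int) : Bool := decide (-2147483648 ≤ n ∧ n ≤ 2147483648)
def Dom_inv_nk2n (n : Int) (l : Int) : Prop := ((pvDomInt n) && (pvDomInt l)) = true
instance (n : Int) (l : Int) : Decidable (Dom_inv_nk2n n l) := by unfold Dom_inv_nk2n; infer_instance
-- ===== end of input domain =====

-- B replaces A's binary recursion by an explicit iterative stack of (value,count) frames
-- emitting leaves left-to-right (objective: alternative decomposition, same results).


-- ===== PORT A =====
-- math.isqrt, hand-ported: exact for m ≥ 0 (the only case reachable inside Pre_; Python raises on m < 0).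
def pyIsqrt (m : Int) : Int := Int.ofNat (Nat.sqrt m.toNat)

def inv_cantor (n : Int) : Int × Int :=
  let w := PySem.Int.floordiv (pyIsqrt (8 * n + 1) - 1) 2
  let t := PySem.Int.floordiv (w * (w + 1)) 2
  let j := n - t
  let i := w - j
  (i, j)

-- A's recursion, with a fuel counter only to make it total in Lean (Python diverges when l ≤ 0;
-- inside Pre_ the fuel l.toNat is never exhausted).
def invA (fuel : Nat) (n : Int) (l : Int) : List Int :=
  match fuel with
  | 0 => []
  | fuel + 1 =>
    if l = 1 then [n]
    else if l = 2 then
      let (i, j) := inv_cantor n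
      [i, j]
    else
      let first_l := l - PySem.Int.floordiv l 2
      let second_l := PySem.Int.floordiv l 2
      let (first_val, second_val) := inv_cantor n
      invA fuel first_val first_l ++ invA fuel second_val second_l

def inv_nk2n (n : Int) (l : Int) : List Int := invA l.toNat n l

-- ===== PORT B =====
-- B's while loop over the explicit stack; fuel 2*l.toNat bounds the number of pops (2l-1 inside Pre_).
def invB (fuel : Nat) (stack : List (Int × Int)) (out : List Int) : List Int :=
  match fuel with
  | 0 => out
  | fuel + 1 =>
    match stack with
    | [] => out
    | (v, c) :: rest =>
      if c = 1 then invB fuel rest (out ++ [v])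
      else
        let (i, j) := inv_cantor v
        invB fuel ((i, c - PySem.Int.floordiv c 2) :: (j, PySem.Int.floordiv c 2) :: rest) out

def inv_nk2n_alt (n : Int) (l : Int) : List Int := invB (2 * l.toNat) [(n, l)] []

-- ===== PRECONDITION & SPEC =====
-- Pre_ excludes exactly the inputs where Python A does not return: l ≤ 0 gives infinite
-- recursion (RecursionError) and l ≥ 2 with n < 0 raises ValueError in math.isqrt.
def Pre_inv_nk2n (n : Int) (l : Int) : Prop := 1 ≤ l ∧ (l = 1 ∨ 0 ≤ n)
instance (n : Int) (l : Int) : Decidable (Pre_inv_nk2n n l) := by unfold Pre_inv_nk2n; infer_instance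
def pvWitness_inv_nk2n : Int × Int := (7, 3)

def Spec_inv_nk2n (n : Int) (l : Int) (out : List Int) : Prop := out = inv_nk2n_alt n l
instance (n : Int) (l : Int) (out : List Int) : Decidable (Spec_inv_nk2n n l out) := by unfold Spec_inv_nk2n; infer_instance

-- ===== CLAIM (what is proved, stated in full; the proofs are below) =====
def Claim_equal_inv_nk2n : Prop := ∀ (n : Int) (l : Int), Dom_inv_nk2n n l → Pre_inv_nk2n n l → Spec_inv_nk2n n l (inv_nk2n n l)

-- ===== LEMMAS AND PROOFS =====

-- floor-halving facts for 1 ≤ c: writing q = c // 2, we have the bracket c = 2q or 2q+1.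
lemma floordiv_two_facts (c : Int) (hc : 2 ≤ c) :
    1 ≤ PySem.Int.floordiv c 2 ∧ PySem.Int.floordiv c 2 < c ∧
    1 ≤ c - PySem.Int.floordiv c 2 ∧ c - PySem.Int.floordiv c 2 < c := by
  rw [PySem.Int.floordiv_eq_ediv_of_pos (by omega)]
  omega

-- invA does not depend on the fuel as long as it is at least l.toNat (for 1 ≤ l).
lemma invA_fuel (k : Nat) : ∀ (l : Int), 1 ≤ l → l.toNat ≤ k →
    ∀ (f₁ f₂ : Nat), l.toNat ≤ f₁ → l.toNat ≤ f₂ → ∀ n, invA f₁ n l = invA f₂ n l := by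
  induction k with
  | zero => intro l hl hk; omega
  | succ k ih =>
    intro l hl hk f₁ f₂ h₁ h₂ n
    obtain ⟨g₁, rfl⟩ : ∃ g, f₁ = g + 1 := ⟨f₁ - 1, by omega⟩
    obtain ⟨g₂, rfl⟩ : ∃ g, f₂ = g + 1 := ⟨f₂ - 1, by omega⟩
    by_cases h1 : l = 1
    · simp [invA, h1]
    · by_cases h2 : l = 2
      · simp [invA, h2]
      · have h3 : 3 ≤ l := by omega
        have hf := floordiv_two_facts l (by omega)
        set q := PySem.Int.floordiv l 2 with hq
        simp only [invA, h1, h2, if_false]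
        have e1 : invA g₁ (inv_cantor n).1 (l - q) = invA g₂ (inv_cantor n).1 (l - q) :=
          ih (l - q) (by omega) (by omega) g₁ g₂ (by omega) (by omega) _
        have e2 : invA g₁ (inv_cantor n).2 q = invA g₂ (inv_cantor n).2 q :=
          ih q (by omega) (by omega) g₁ g₂ (by omega) (by omega) _
        cases hC : inv_cantor n with
        | mk i j =>
          simp only [hC] at e1 e2 ⊢
          rw [e1, e2]

-- invA at full fuel splits as A's recursion does, for every 2 ≤ c, including c = 2.
lemma invA_split (c : Int) (hc : 2 ≤ c) (n : Int) :
    invA c.toNat n c =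
      invA (c - PySem.Int.floordiv c 2).toNat (inv_cantor n).1 (c - PySem.Int.floordiv c 2) ++
      invA (PySem.Int.floordiv c 2).toNat (inv_cantor n).2 (PySem.Int.floordiv c 2) := by
  have hf := floordiv_two_facts c hc
  set q := PySem.Int.floordiv c 2 with hq
  by_cases h2 : c = 2
  · subst h2
    have hq2 : q = 1 := by
      rw [hq, PySem.Int.floordiv_eq_ediv_of_pos (by omega)]
      decide
    rw [hq2]
    cases hC : inv_cantor n with
    | mk i j => simp [invA, hC]
  · obtain ⟨g, hg⟩ : ∃ g, c.toNat = g + 1 := ⟨c.toNat - 1, by omega⟩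
    rw [hg]
    simp only [invA, show ¬ c = 1 by omega, show ¬ c = 2 from h2, if_false]
    cases hC : inv_cantor n with
    | mk i j =>
      rw [invA_fuel g (c - q) (by omega) (by omega) g (c - q).toNat (by omega) (by omega),
          invA_fuel g q (by omega) (by omega) g q.toNat (by omega) (by omega)]

-- Running B's loop through one frame (v, c) with 1 ≤ c consumes 2*c.toNat - 1 pops and
-- appends exactly A's list for (v, c) to the output accumulator.
lemma invB_run (k : Nat) : ∀ (c : Int), 1 ≤ c → c.toNat ≤ k →
    ∀ (v : Int) (fuel : Nat) (rest : List (Int × Int)) (out : List Int),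
      2 * c.toNat - 1 ≤ fuel →
      invB fuel ((v, c) :: rest) out = invB (fuel - (2 * c.toNat - 1)) rest (out ++ invA c.toNat v c) := by
  induction k with
  | zero => intro c hc hk; omega
  | succ k ih =>
    intro c hc hk v fuel rest out hfuel
    obtain ⟨f, rfl⟩ : ∃ f, fuel = f + 1 := ⟨fuel - 1, by omega⟩
    by_cases h1 : c = 1
    · subst h1
      simp [invB, invA]
    · have hc2 : 2 ≤ c := by omega
      have hf := floordiv_two_facts c hc2
      set q := PySem.Int.floordiv c 2 with hq
      have htn : (c - q).toNat + q.toNat = c.toNat := by omega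
      simp only [invB, h1, if_false]
      cases hC : inv_cantor v with
      | mk i j =>
        rw [ih (c - q) (by omega) (by omega) i f _ out (by omega),
            ih q (by omega) (by omega) j _ _ _ (by omega),
            invA_split c hc2 v, hC]
        simp only [List.append_assoc]
        congr 1
        omega

theorem inv_nk2n_spec_aux (n l : Int) (hl : 1 ≤ l) : inv_nk2n n l = inv_nk2n_alt n l := by
  unfold inv_nk2n inv_nk2n_alt
  rw [invB_run l.toNat l hl (le_refl _) n (2 * l.toNat) [] [] (by omega)]
  have h1 : 2 * l.toNat - (2 * l.toNat - 1) = 1 := by omega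
  rw [h1]
  simp [invB]

-- ===== VERDICT (by name: the statement is the Claim_ definition above) =====
theorem inv_nk2n_spec : Claim_equal_inv_nk2n := by
  intro n l _ hpre
  unfold Spec_inv_nk2n
  exact inv_nk2n_spec_aux n l hpre.1
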